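-- pv_equiv track=rewrite | github.com/Howlinmoon/BlackNovaBot | test_skeleton.py | upgradeCost
-- ===== SOURCE A (Python) =====
-- def upgradeCost(desiredvalue,currentvalue):
--     DeltaCost = 0
--     Delta = desiredvalue - currentvalue
--     while Delta > 0:
--         DeltaCost = DeltaCost + (2 **  (desiredvalue - Delta))
--         Delta = Delta - 1
--
--     DeltaCost = DeltaCost * 1000
--     return DeltaCost
-- ===== SOURCE B (Python) =====
-- def upgradeCost(desiredvalue, currentvalue):
--     if desiredvalue <= currentvalue:
--         return 0
--     return (2 ** desiredvalue - 2 ** currentvalue) * 1000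
-- ===== Notes on version B (the rewrite author's own statement) =====
-- stated objective: alternative
-- what changed: Replaces the summation loop over powers of two by the geometric-series closed form (2^desired - 2^current)*1000, guarded by desired<=current -> 0.
-- outside the precondition, e.g. on upgradeCost(1, -1): A returns 1500.0, B returns 1500.0
import Mathlib
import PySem

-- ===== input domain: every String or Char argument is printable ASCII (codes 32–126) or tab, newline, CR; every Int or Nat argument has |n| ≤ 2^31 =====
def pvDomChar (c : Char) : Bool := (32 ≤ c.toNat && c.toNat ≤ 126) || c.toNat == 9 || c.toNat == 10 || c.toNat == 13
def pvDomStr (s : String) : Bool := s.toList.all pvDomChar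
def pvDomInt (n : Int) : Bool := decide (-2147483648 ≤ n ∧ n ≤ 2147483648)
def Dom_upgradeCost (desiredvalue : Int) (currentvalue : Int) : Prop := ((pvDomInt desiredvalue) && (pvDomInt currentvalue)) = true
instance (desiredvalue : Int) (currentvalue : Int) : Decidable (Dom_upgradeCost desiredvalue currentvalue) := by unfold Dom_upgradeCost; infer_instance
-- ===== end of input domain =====

-- B computes the cost by the geometric-series closed form (2^desired - 2^current)*1000 instead of A's summation loop.
-- Pre_ excludes inputs where A's loop uses a negative exponent (2**-k), returning a float, not an int.
-- ===== PORT A =====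
-- while Delta > 0: DeltaCost += 2**(desiredvalue - Delta); Delta -= 1   (Delta counted down as a Nat)
def upgradeLoopA (desiredvalue : Int) : Nat → Int → Int
  | 0, acc => acc
  | n+1, acc => upgradeLoopA desiredvalue n (acc + 2 ^ (desiredvalue - (n+1 : Nat)).toNat)

def upgradeCost (desiredvalue : Int) (currentvalue : Int) : Int :=
  (upgradeLoopA desiredvalue (desiredvalue - currentvalue).toNat 0) * 1000

-- ===== PORT B =====
def upgradeCost_alt (desiredvalue : Int) (currentvalue : Int) : Int :=
  if desiredvalue ≤ currentvalue then 0
  else (2 ^ desiredvalue.toNat - 2 ^ currentvalue.toNat) * 1000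

-- ===== PRECONDITION & SPEC =====
-- Pre_ excludes inputs with currentvalue < 0 < desiredvalue - currentvalue, on which A's
-- 2**(negative) yields a float, so A does not return an int there.
def Pre_upgradeCost (desiredvalue : Int) (currentvalue : Int) : Prop :=
  desiredvalue ≤ currentvalue ∨ 0 ≤ currentvalue
instance (desiredvalue : Int) (currentvalue : Int) : Decidable (Pre_upgradeCost desiredvalue currentvalue) := by unfold Pre_upgradeCost; infer_instance
def pvWitness_upgradeCost : Int × Int := (5, 2)
def Spec_upgradeCost (desiredvalue : Int) (currentvalue : Int) (out : Int) : Prop := out = upgradeCost_alt desiredvalue currentvalue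
instance (desiredvalue : Int) (currentvalue : Int) (out : Int) : Decidable (Spec_upgradeCost desiredvalue currentvalue out) := by unfold Spec_upgradeCost; infer_instance

-- ===== CLAIM (what is proved, stated in full; the proofs are below) =====
def Claim_equal_upgradeCost : Prop := ∀ (desiredvalue : Int) (currentvalue : Int), Dom_upgradeCost desiredvalue currentvalue → Pre_upgradeCost desiredvalue currentvalue → Spec_upgradeCost desiredvalue currentvalue (upgradeCost desiredvalue currentvalue)

-- ===== LEMMAS AND PROOFS =====
-- Loop invariant: with n loop steps left and n ≤ d, the loop adds 2^d - 2^(d-n) to acc.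
lemma upgradeLoopA_closed (d : Int) (n : Nat) (acc : Int) (h : (n : Int) ≤ d) :
    upgradeLoopA d n acc = acc + 2 ^ d.toNat - 2 ^ (d - n).toNat := by
  induction n generalizing acc with
  | zero => simp [upgradeLoopA]
  | succ k ih =>
    have hk : (k : Int) ≤ d := by push_cast at h ⊢; omega
    rw [upgradeLoopA, ih _ hk]
    have h1 : (d - (k+1 : Nat)).toNat + 1 = (d - k).toNat := by
      push_cast at h ⊢; omega
    have : (2:Int) ^ (d - (k : Nat)).toNat = 2 * 2 ^ (d - (k+1 : Nat)).toNat := by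
      rw [← h1, pow_succ]; ring
    rw [this]; ring

-- ===== VERDICT (by name: the statement is the Claim_ definition above) =====
theorem upgradeCost_spec : Claim_equal_upgradeCost := by
  intro d c _ hpre
  unfold Spec_upgradeCost upgradeCost upgradeCost_alt
  by_cases hle : d ≤ c
  · have : (d - c).toNat = 0 := by omega
    simp [this, upgradeLoopA, hle]
  · rcases hpre with h | hc
    · omega
    · have hn : ((d - c).toNat : Int) ≤ d := by omega
      rw [upgradeLoopA_closed d _ 0 hn]
      have h2 : d - ((d - c).toNat : Int) = c := by omega
      rw [h2]
      simp [hle]
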